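-- pv_equiv track=rewrite | github.com/msullivan/advent-of-code | 2023/13b.py | lcheck
-- ===== SOURCE A (Python) =====
-- def lcheck(x, old):
--     for i in range(1, len(x)):
--         start = x[:i]
--         end = x[i:]
--         if len(start) < len(end):
--             if start == end[:len(start)][::-1] and i != old:
--                 return i
--         else:
--             if start[-len(end):] == end[::-1] and i != old:
--                 return i
-- ===== SOURCE B (Python) =====
-- def lcheck(x, old):
--     # Expand-around-center with two indices and early exit; no slicing, no list reversal.
--     n = len(x)
--     for i in range(1, n):
--         if i == old:
--             continue
--         lo, hi = i - 1, i
--         while lo >= 0 and hi < n and x[lo] == x[hi]: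
--             lo -= 1
--             hi += 1
--         if lo < 0 or hi >= n:
--             return i
--     return None
-- ===== Notes on version B (the rewrite author's own statement) =====
-- stated objective: faster
-- what changed: Replaces A's per-candidate slicing, reversal and whole-list comparison with an in-place expand-around-center two-pointer scan that exits at the first mismatching pair and builds no intermediate lists.
import Mathlib
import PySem

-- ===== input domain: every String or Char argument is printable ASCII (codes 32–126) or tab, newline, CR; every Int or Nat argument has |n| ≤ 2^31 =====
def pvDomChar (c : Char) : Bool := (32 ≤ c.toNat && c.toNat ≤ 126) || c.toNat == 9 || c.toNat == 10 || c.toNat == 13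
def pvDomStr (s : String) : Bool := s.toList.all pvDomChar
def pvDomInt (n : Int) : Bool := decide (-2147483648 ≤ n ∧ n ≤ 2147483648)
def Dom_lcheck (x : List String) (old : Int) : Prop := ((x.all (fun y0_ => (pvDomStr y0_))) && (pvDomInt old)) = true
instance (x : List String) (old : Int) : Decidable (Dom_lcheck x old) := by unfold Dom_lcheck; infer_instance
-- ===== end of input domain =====

-- B replaces A's per-candidate slicing/reversal/whole-list comparison by an in-place
-- two-pointer expand-around-center check with early exit (measured faster in a timing run).

-- ===== PORT A =====
-- loop 'for i in range(1, len(x))' with early return; '[::-1]' is .reverse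
-- (exact per PySem.List.slice?_none_none_neg_one)
def lcheckLoop (x : List String) (old : Int) : List Int → Option Int
  | [] => none
  | i :: rest =>
    let start := PySem.List.slice x none (some i)
    let endl := PySem.List.slice x (some i) none
    if start.length < endl.length then
      if start = (PySem.List.slice endl none (some (start.length : Int))).reverse ∧ i ≠ old then
        some i
      else lcheckLoop x old rest
    else
      if PySem.List.slice start (some (-(endl.length : Int))) none = endl.reverse ∧ i ≠ old then
        some i
      else lcheckLoop x old rest

def lcheck (x : List String) (old : Int) : Option Int :=
  lcheckLoop x old (PySem.List.pyRange 1 (x.length : Int) 1)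

-- ===== PORT B =====
-- the 'while lo >= 0 and hi < n and x[lo] == x[hi]' loop followed by 'lo < 0 or hi >= n'
def expandB (x : List String) (lo hi : Int) : Bool :=
  if h : 0 ≤ lo ∧ hi < (x.length : Int) ∧ PySem.List.pyGet? x lo = PySem.List.pyGet? x hi then
    expandB x (lo - 1) (hi + 1)
  else
    decide (lo < 0 ∨ (x.length : Int) ≤ hi)
termination_by ((x.length : Int) - hi).toNat
decreasing_by omega

def lcheckAltLoop (x : List String) (old : Int) : List Int → Option Int
  | [] => none
  | i :: rest =>
    if i = old then lcheckAltLoop x old rest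
    else if expandB x (i - 1) i then some i
    else lcheckAltLoop x old rest

def lcheck_alt (x : List String) (old : Int) : Option Int :=
  lcheckAltLoop x old (PySem.List.pyRange 1 (x.length : Int) 1)

-- ===== PRECONDITION & SPEC =====
def Spec_lcheck (x : List String) (old : Int) (out : Option Int) : Prop := out = lcheck_alt x old
instance (x : List String) (old : Int) (out : Option Int) : Decidable (Spec_lcheck x old out) := by unfold Spec_lcheck; infer_instance

-- ===== CLAIM (what is proved, stated in full; the proofs are below) =====
def Claim_equal_lcheck : Prop := ∀ (x : List String) (old : Int), Dom_lcheck x old → Spec_lcheck x old (lcheck x old)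

-- ===== LEMMAS AND PROOFS =====

-- the common mirror condition at cut k: pairs (k-1-j, k+j) agree out to the nearer border
def Mirror (x : List String) (k : Nat) : Prop :=
  ∀ j : Nat, j < min k (x.length - k) → x[k-1-j]? = x[k+j]?

theorem eq_iff_forall_getElem? {α : Type} (a b : List α) :
    a = b ↔ ∀ m : Nat, a[m]? = b[m]? :=
  ⟨fun h m => by rw [h], fun h => List.ext_getElem? h⟩

theorem expandB_iff (x : List String) (lo hi : Int) :
    expandB x lo hi = true ↔
      ∀ j : Nat, 0 ≤ lo - j → hi + j < (x.length : Int) →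
        PySem.List.pyGet? x (lo - j) = PySem.List.pyGet? x (hi + j) := by
  fun_induction expandB x lo hi with
  | case1 lo hi h ih =>
    rw [ih]
    constructor
    · intro H j hj1 hj2
      cases j with
      | zero => simpa using h.2.2
      | succ m =>
        have e1 : lo - ((m : Nat) + 1 : Nat) = lo - 1 - m := by push_cast; ring
        have e2 : hi + ((m : Nat) + 1 : Nat) = hi + 1 + m := by push_cast; ring
        rw [e1, e2]
        apply H m <;> omega
    · intro H j h1 h2
      have e1 : lo - 1 - (j:Int) = lo - ((j+1 : Nat) : Int) := by push_cast; ring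
      have e2 : hi + 1 + (j:Int) = hi + ((j+1 : Nat) : Int) := by push_cast; ring
      rw [e1, e2]
      apply H <;> push_cast <;> omega
  | case2 lo hi h =>
    simp only [decide_eq_true_eq]
    by_cases hb : lo < 0 ∨ (x.length : Int) ≤ hi
    · constructor
      · intro _ j h1 h2
        exfalso; omega
      · intro _; exact hb
    · push Not at hb
      constructor
      · intro hc; exfalso; omega
      · intro H
        exfalso
        apply h
        refine ⟨hb.1, hb.2, ?_⟩
        have := H 0 (by omega) (by omega)
        simpa using this

theorem expandB_iff_mirror (x : List String) (k : Nat) (_h1 : 1 ≤ k) (h2 : k < x.length) :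
    expandB x ((k : Int) - 1) (k : Int) = true ↔ Mirror x k := by
  rw [expandB_iff]
  constructor
  · intro H j hj
    have hj1 : 0 ≤ (k:Int) - 1 - j := by omega
    have hj2 : (k:Int) + j < x.length := by omega
    have := H j hj1 hj2
    rw [show (k:Int) - 1 - (j:Int) = ((k-1-j : Nat) : Int) by omega,
        show (k:Int) + (j:Int) = ((k+j : Nat) : Int) by omega] at this
    rw [PySem.List.pyGet?_natCast, PySem.List.pyGet?_natCast] at this
    exact this
  · intro H j hj1 hj2
    have hj : j < min k (x.length - k) := by omega
    have := H j hj
    rw [show (k:Int) - 1 - (j:Int) = ((k-1-j : Nat) : Int) by omega,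
        show (k:Int) + (j:Int) = ((k+j : Nat) : Int) by omega]
    rw [PySem.List.pyGet?_natCast, PySem.List.pyGet?_natCast]
    exact this

theorem condA_lt_iff (x : List String) (k : Nat) (_h1 : 1 ≤ k) (_h2 : k < x.length)
    (hlt : k < x.length - k) :
    x.take k = ((x.drop k).take k).reverse ↔ Mirror x k := by
  have hmin : min k (x.length - k) = k := by omega
  have hlen : ((x.drop k).take k).length = k := by
    simp [List.length_take, List.length_drop]; omega
  rw [eq_iff_forall_getElem?]
  constructor
  · intro H j hj
    rw [hmin] at hj
    have := H (k-1-j)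
    rw [List.getElem?_take, if_pos (by omega : k-1-j < k),
        List.getElem?_reverse (by omega : k-1-j < ((x.drop k).take k).length),
        hlen, List.getElem?_take, if_pos (by omega : k-1-(k-1-j) < k),
        List.getElem?_drop] at this
    rw [show k-1-(k-1-j) = j by omega] at this
    rw [show k + j = k + j by rfl] at this
    exact this
  · intro H m
    by_cases hm : m < k
    · have := H (k-1-m) (by omega)
      rw [List.getElem?_take, if_pos hm,
          List.getElem?_reverse (by omega : m < ((x.drop k).take k).length),
          hlen, List.getElem?_take, if_pos (by omega : k-1-m < k),
          List.getElem?_drop]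
      rw [show k-1-(k-1-m) = m by omega] at this
      exact this
    · rw [List.getElem?_take, if_neg hm,
          List.getElem?_eq_none (by simp [hlen]; omega)]

theorem condA_ge_iff (x : List String) (k : Nat) (_h1 : 1 ≤ k) (h2 : k < x.length)
    (hge : x.length - k ≤ k) :
    (x.take k).drop (k - (x.length - k)) = (x.drop k).reverse ↔ Mirror x k := by
  set m := x.length - k with hm
  have hm1 : 1 ≤ m := by omega
  have hmin : min k (x.length - k) = m := by omega
  have hlen : (x.drop k).length = m := by rw [List.length_drop]
  rw [eq_iff_forall_getElem?]
  constructor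
  · intro H j hj
    rw [hmin] at hj
    have := H (m-1-j)
    rw [List.getElem?_drop, List.getElem?_take,
        if_pos (by omega : k - m + (m-1-j) < k),
        List.getElem?_reverse (by omega : m-1-j < (x.drop k).length),
        hlen, List.getElem?_drop] at this
    rw [show k - m + (m-1-j) = k-1-j by omega,
        show k + (m - 1 - (m-1-j)) = k + j by omega] at this
    exact this
  · intro H t
    by_cases ht : t < m
    · have := H (m-1-t) (by omega)
      rw [List.getElem?_drop, List.getElem?_take,
          if_pos (by omega : k - m + t < k),
          List.getElem?_reverse (by omega : t < (x.drop k).length),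
          hlen, List.getElem?_drop]
      rw [show k-1-(m-1-t) = k - m + t by omega,
          show k + (m-1-t) = k + (m - 1 - t) by omega] at this
      exact this
    · rw [List.getElem?_eq_none (by simp [List.length_take]; omega),
          List.getElem?_eq_none (by simp [hlen]; omega)]

theorem loop_eq (x : List String) (old : Int) (l : List Int)
    (hl : ∀ i ∈ l, 1 ≤ i ∧ i < (x.length : Int)) :
    lcheckLoop x old l = lcheckAltLoop x old l := by
  induction l with
  | nil => rfl
  | cons i rest ih =>
    obtain ⟨hi1, hi2⟩ := hl i (List.mem_cons_self ..)
    obtain ⟨k, rfl⟩ : ∃ k : Nat, i = (k : Int) := ⟨i.toNat, by omega⟩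
    have hk1 : 1 ≤ k := by omega
    have hk2 : k < x.length := by omega
    have ih' := ih (fun j hj => hl j (List.mem_cons_of_mem _ hj))
    simp only [lcheckLoop, lcheckAltLoop, PySem.List.slice_to_natCast,
      PySem.List.slice_from_natCast]
    have hlt : (x.take k).length = k := by simp [List.length_take]; omega
    have hld : (x.drop k).length = x.length - k := by simp [List.length_drop]
    rw [hlt, hld]
    have hB := expandB_iff_mirror x k hk1 hk2
    by_cases hbr : k < x.length - k
    · rw [if_pos hbr]
      have hA := condA_lt_iff x k hk1 hk2 hbr
      by_cases hold : (k : Int) = old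
      · rw [if_neg (by tauto), if_pos hold, ih']
      · by_cases hc : Mirror x k
        · rw [if_pos ⟨hA.mpr hc, hold⟩, if_neg hold, if_pos (hB.mpr hc)]
        · rw [if_neg (by tauto : ¬(x.take k = ((x.drop k).take k).reverse ∧ (k:Int) ≠ old)),
              if_neg hold, if_neg (by simp [hB, hc]), ih']
    · rw [if_neg hbr]
      have hge : x.length - k ≤ k := by omega
      rw [PySem.List.slice_from_neg_natCast (x.take k) (x.length - k) (by omega), hlt]
      have hA := condA_ge_iff x k hk1 hk2 hge
      by_cases hold : (k : Int) = old
      · rw [if_neg (by tauto), if_pos hold, ih']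
      · by_cases hc : Mirror x k
        · rw [if_pos ⟨hA.mpr hc, hold⟩, if_neg hold, if_pos (hB.mpr hc)]
        · rw [if_neg (by tauto : ¬((x.take k).drop (k - (x.length - k)) = (x.drop k).reverse ∧ (k:Int) ≠ old)),
              if_neg hold, if_neg (by simp [hB, hc]), ih']

-- ===== VERDICT (by name: the statement is the Claim_ definition above) =====
theorem lcheck_spec : Claim_equal_lcheck := by
  intro x old _
  unfold Spec_lcheck lcheck lcheck_alt
  exact loop_eq x old _ (fun i hi => (PySem.List.mem_pyRange_one.mp hi))
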